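-- pv_equiv track=rewrite | github.com/Parmesh2006/AdventOfCode2017 | Advent Of Code 2017/Day1/Day1.py | getValidSumFunction
-- ===== SOURCE A (Python) =====
-- def getValidSumFunction(inp: str) -> int:
--     sumOfDigits: int = 0
--
--     for i in range(0, len(inp)):
--         if i < len(inp) - 1:
--             if inp[i] == inp[i + 1]:
--                 sumOfDigits += int(inp[i])
--         else:
--             if inp[0] == inp[len(inp) - 1]:
--                 sumOfDigits += int(inp[0])
--
--     return sumOfDigits
-- ===== SOURCE B (Python) =====
-- def getValidSumFunction(inp: str) -> int:
--     # Run-length decomposition: each maximal run of an identical character d of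
--     # length L contributes int(d)*(L-1); the circular wrap adds int(inp[0]) once.
--     total = 0
--     i = 0
--     n = len(inp)
--     while i < n:
--         j = i + 1
--         while j < n and inp[j] == inp[i]:
--             j += 1
--         if j - i > 1:
--             total += int(inp[i]) * (j - i - 1)
--         i = j
--     if inp and inp[0] == inp[-1]:
--         total += int(inp[0])
--     return total
-- ===== Notes on version B (the rewrite author's own statement) =====
-- stated objective: alternative
-- what changed: B compresses the string into maximal runs of equal characters and adds digit*(run_length-1) per run, plus one separate circular wrap term, instead of A's per-index scan whose loop body branches on whether the index is the last one.
import Mathlib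
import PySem

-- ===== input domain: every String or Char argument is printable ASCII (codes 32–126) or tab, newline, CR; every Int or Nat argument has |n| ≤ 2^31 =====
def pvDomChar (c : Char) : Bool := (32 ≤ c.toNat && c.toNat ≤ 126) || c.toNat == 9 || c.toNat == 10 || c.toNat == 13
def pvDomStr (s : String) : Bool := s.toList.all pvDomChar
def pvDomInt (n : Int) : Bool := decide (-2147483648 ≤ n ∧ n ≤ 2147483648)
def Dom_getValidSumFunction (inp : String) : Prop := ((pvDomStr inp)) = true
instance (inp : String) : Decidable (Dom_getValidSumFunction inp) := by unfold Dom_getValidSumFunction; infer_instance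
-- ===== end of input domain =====

-- B changes the decomposition (maximal runs + a separate circular wrap term) rather than A's
-- per-index scan with a last-index branch; equal cost, return value proved equal on Pre_.

-- int(c) for a one-character digit string: exact for '0'..'9'; Pre_ restricts int() to digits.
def digitVal (c : Char) : Int := (c.toNat : Int) - 48

-- ===== PORT A =====
def getValidSumFunction (inp : String) : Int :=
  let l := inp.toList
  (List.range l.length).foldl
    (fun s i =>
      if i < l.length - 1 then
        if l.getD i ' ' = l.getD (i + 1) ' ' then s + digitVal (l.getD i ' ') else s
      else
        if l.getD 0 ' ' = l.getD (l.length - 1) ' ' then s + digitVal (l.getD 0 ' ') else s)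
    0

-- ===== PORT B =====
-- the outer while-loop of Source B: consume one maximal run per step
def bRuns : List Char → Int
  | [] => 0
  | c :: rest =>
      let t := rest.takeWhile (fun x => x == c)   -- the inner while-loop: j - i - 1 = t.length
      (if t.length > 0 then digitVal c * (t.length : Int) else 0) + bRuns (rest.drop t.length)
termination_by l => l.length
decreasing_by simp

def getValidSumFunction_alt (inp : String) : Int :=
  let l := inp.toList
  bRuns l +
    (if l.isEmpty then 0
     else if l.getD 0 ' ' = l.getD (l.length - 1) ' ' then digitVal (l.getD 0 ' ') else 0)

-- ===== PRECONDITION & SPEC =====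
-- Pre_ excludes exactly the inputs on which Python A raises ValueError: int() applied to a
-- non-digit character (at an adjacent equal pair, or at the wrap position when first = last).
def Pre_getValidSumFunction (inp : String) : Prop :=
  let l := inp.toList
  (∀ i, i < l.length - 1 → l.getD i ' ' = l.getD (i + 1) ' ' → (l.getD i ' ').isDigit) ∧
  (l ≠ [] → l.getD 0 ' ' = l.getD (l.length - 1) ' ' → (l.getD 0 ' ').isDigit)
instance (inp : String) : Decidable (Pre_getValidSumFunction inp) := by
  unfold Pre_getValidSumFunction; infer_instance

def pvWitness_getValidSumFunction : String := "91212129"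

def Spec_getValidSumFunction (inp : String) (out : Int) : Prop := out = getValidSumFunction_alt inp
instance (inp : String) (out : Int) : Decidable (Spec_getValidSumFunction inp out) := by
  unfold Spec_getValidSumFunction; infer_instance

-- ===== CLAIM (what is proved, stated in full; the proofs are below) =====
def Claim_equal_getValidSumFunction : Prop := ∀ (inp : String), Dom_getValidSumFunction inp → Pre_getValidSumFunction inp → Spec_getValidSumFunction inp (getValidSumFunction inp)

-- ===== LEMMAS AND PROOFS =====

-- sum of the adjacent-equal-pair contributions, recursively on the list
def pairSum : List Char → Int
  | [] => 0
  | [_] => 0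
  | a :: b :: rest => (if a = b then digitVal a else 0) + pairSum (b :: rest)

-- the pair-term of A's loop for indices before the last
def pairTerm (l : List Char) (i : Nat) : Int :=
  if l.getD i ' ' = l.getD (i + 1) ' ' then digitVal (l.getD i ' ') else 0

lemma foldl_add_gen (f : Nat → Int) :
    ∀ (xs : List Nat) (s : Int),
      xs.foldl (fun a i => a + f i) s = s + (xs.map f).sum := by
  intro xs
  induction xs with
  | nil => simp
  | cons x xs ih => intro s; simp [List.foldl, ih]; ring

lemma pairSum_eq_sum (l : List Char) :
    ((List.range (l.length - 1)).map (pairTerm l)).sum = pairSum l := by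
  induction l with
  | nil => simp [pairSum]
  | cons a l ih =>
    cases l with
    | nil => simp [pairSum]
    | cons b rest =>
      have h : (a :: b :: rest).length - 1 = rest.length + 1 := by simp
      rw [h, List.range_succ_eq_map]
      simp only [List.map_cons, List.map_map, List.sum_cons]
      have h2 : ((List.range rest.length).map
          (pairTerm (a :: b :: rest) ∘ Nat.succ)).sum = pairSum (b :: rest) := by
        have h4 : (b :: rest).length - 1 = rest.length := by simp
        rw [← ih, h4]
        apply congrArg
        apply List.map_congr_left
        intro i _
        simp [pairTerm, List.getD]
      rw [h2]
      simp [pairSum, pairTerm, List.getD]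

lemma pairSum_run (t d : List Char) (c : Char)
    (ht : ∀ x ∈ t, x = c) (hd : ∀ x, d.head? = some x → x ≠ c) :
    pairSum (c :: (t ++ d)) = digitVal c * (t.length : Int) + pairSum d := by
  induction t with
  | nil =>
    cases d with
    | nil => simp [pairSum]
    | cons x d' =>
      have hx : x ≠ c := hd x rfl
      simp only [List.nil_append, pairSum]
      rw [if_neg (fun h => hx h.symm)]
      simp
  | cons a t' ih =>
    have ha : a = c := ht a (by simp)
    subst ha
    have := ih (fun x hx => ht x (by simp [hx]))
    simp only [List.cons_append, pairSum, this]
    simp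
    ring

lemma bRuns_eq_pairSum (l : List Char) : bRuns l = pairSum l := by
  suffices H : ∀ n (l : List Char), l.length ≤ n → bRuns l = pairSum l from H l.length l le_rfl
  intro n
  induction n with
  | zero =>
    intro l hl
    have : l = [] := List.length_eq_zero_iff.mp (Nat.le_zero.mp hl)
    subst this; simp [bRuns, pairSum]
  | succ n ihn =>
    intro l hl
    cases l with
    | nil => simp [bRuns, pairSum]
    | cons c rest =>
      rw [bRuns]
      set t := rest.takeWhile (fun x => x == c) with hT
      have hsplit : rest = t ++ rest.dropWhile (fun x => x == c) := by
        rw [hT]; exact (List.takeWhile_append_dropWhile).symm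
      have hdrop : rest.drop t.length = rest.dropWhile (fun x => x == c) := by
        conv_lhs => rw [hsplit]
        simp
      have hlen : (rest.dropWhile (fun x => x == c)).length ≤ n := by
        have := List.length_dropWhile_le (p := fun x => x == c) (l := rest)
        simp at hl; omega
      have hIH := ihn _ hlen
      have ht : ∀ x ∈ t, x = c := by
        intro x hx
        have := List.mem_takeWhile_imp (hT ▸ hx)
        simpa using this
      have hd : ∀ x, (rest.dropWhile (fun x => x == c)).head? = some x → x ≠ c := by
        intro x hx
        have := List.head?_dropWhile_not (p := fun x => x == c) (l := rest)
        rw [hx] at this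
        simpa using this
      have hps := pairSum_run t (rest.dropWhile (fun x => x == c)) c ht hd
      rw [hdrop, hIH]
      conv_rhs => rw [show (c :: rest) = c :: (t ++ rest.dropWhile (fun x => x == c)) from by rw [← hsplit]]
      rw [hps]
      by_cases h : t.length > 0
      · simp [h]
      · simp at h; simp [h]

-- A's fold equals pairSum plus the wrap term (nonempty case)
lemma A_eq (l : List Char) :
    (List.range l.length).foldl
      (fun s i =>
        if i < l.length - 1 then
          if l.getD i ' ' = l.getD (i + 1) ' ' then s + digitVal (l.getD i ' ') else s
        else
          if l.getD 0 ' ' = l.getD (l.length - 1) ' ' then s + digitVal (l.getD 0 ' ') else s)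
      0
    = pairSum l +
      (if l.isEmpty then 0
       else if l.getD 0 ' ' = l.getD (l.length - 1) ' ' then digitVal (l.getD 0 ' ') else 0) := by
  cases l with
  | nil => simp [pairSum]
  | cons a rest =>
    set l := a :: rest with hL
    have hn : l.length = (l.length - 1) + 1 := by simp [hL]
    set F : Int → Nat → Int := fun s i =>
      if i < l.length - 1 then
        if l.getD i ' ' = l.getD (i + 1) ' ' then s + digitVal (l.getD i ' ') else s
      else
        if l.getD 0 ' ' = l.getD (l.length - 1) ' ' then s + digitVal (l.getD 0 ' ') else s
      with hF
    have hFeq : F = fun s i => s +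
        (if i < l.length - 1 then pairTerm l i
         else if l.getD 0 ' ' = l.getD (l.length - 1) ' ' then digitVal (l.getD 0 ' ') else 0) := by
      funext s i
      rw [hF]; unfold pairTerm
      by_cases h1 : i < l.length - 1
      · simp only [h1, if_true]; split_ifs <;> simp
      · simp only [h1, if_false]; split_ifs <;> simp
    rw [hFeq]
    rw [foldl_add_gen]
    rw [hn, List.range_succ]
    simp only [Nat.add_sub_cancel, List.map_append, List.map_cons, List.map_nil, List.sum_append,
      List.sum_cons, List.sum_nil, lt_irrefl]
    have hmap : (List.range (l.length - 1)).map
        (fun i => if i < l.length - 1 then pairTerm l i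
          else if l.getD 0 ' ' = l.getD (l.length - 1) ' ' then digitVal (l.getD 0 ' ') else 0)
        = (List.range (l.length - 1)).map (pairTerm l) := by
      apply List.map_congr_left
      intro i hi
      simp at hi
      simp [hi]
    rw [hmap, pairSum_eq_sum]
    simp [hL]

-- ===== VERDICT (by name: the statement is the Claim_ definition above) =====
theorem getValidSumFunction_spec : Claim_equal_getValidSumFunction := by
  intro inp _ _
  unfold Spec_getValidSumFunction getValidSumFunction getValidSumFunction_alt
  simp only []
  rw [A_eq, bRuns_eq_pairSum]
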